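-- pv_equiv track=rewrite | github.com/thenol/Leetcode | Greedy/1053. 交换一次的先前排列.py | prevPermOpt1_1
-- ===== SOURCE A (Python) =====
-- from typing import List
--
-- def prevPermOpt1_1(arr: List[int]) -> List[int]:
--     # 单调站
--     stk = [] # 非递增栈
--     N = len(arr)
--     right_less = [N]*N
--     for i in range(N-1, -1, -1):
--         while stk and arr[stk[-1]]<arr[i]: # 更新rightmost[i]，记录最大值
--             right_less[i] = stk.pop()
--
--         # trick: 本质保证了arr[i]找的是所有相同arr[j]中最右边的arr[j]
--         while stk and arr[stk[-1]]==arr[i]: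
--             stk.pop() # 连续的数值，栈顶去重；121这种，在入栈时，会变成12，所以不用考虑
--         stk.append(i)
--
--     for i in range(N-1, -1, -1):
--         if right_less[i] < N: # 找到最右边可以替换的逆序对
--             arr[i], arr[right_less[i]] = arr[right_less[i]], arr[i]
--             return arr
--
--     return arr
-- ===== SOURCE B (Python) =====
-- from typing import List
--
-- def prevPermOpt1_1(arr: List[int]) -> List[int]:
--     # Direct two-pointer scan: find the rightmost descent i, then the leftmost
--     # occurrence of the largest suffix value below arr[i]; swap in place.
--     n = len(arr)
--     i = n - 2
--     while i >= 0 and arr[i] <= arr[i + 1]: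
--         i -= 1
--     if i < 0:
--         return arr
--     j = i + 1
--     while j + 1 < n and arr[j + 1] < arr[i]:
--         j += 1
--     while arr[j] == arr[j - 1]:
--         j -= 1
--     arr[i], arr[j] = arr[j], arr[i]
--     return arr
-- ===== Notes on version B (the rewrite author's own statement) =====
-- stated objective: simpler
-- what changed: Replaced the monotonic-stack pass that builds a full right_less table plus a second selection pass by a direct three-pointer scan: find the rightmost descent i, walk j forward to the largest suffix value below arr[i], back j up to its leftmost equal occurrence, swap once; O(1) extra space instead of O(n).
import Mathlib
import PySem

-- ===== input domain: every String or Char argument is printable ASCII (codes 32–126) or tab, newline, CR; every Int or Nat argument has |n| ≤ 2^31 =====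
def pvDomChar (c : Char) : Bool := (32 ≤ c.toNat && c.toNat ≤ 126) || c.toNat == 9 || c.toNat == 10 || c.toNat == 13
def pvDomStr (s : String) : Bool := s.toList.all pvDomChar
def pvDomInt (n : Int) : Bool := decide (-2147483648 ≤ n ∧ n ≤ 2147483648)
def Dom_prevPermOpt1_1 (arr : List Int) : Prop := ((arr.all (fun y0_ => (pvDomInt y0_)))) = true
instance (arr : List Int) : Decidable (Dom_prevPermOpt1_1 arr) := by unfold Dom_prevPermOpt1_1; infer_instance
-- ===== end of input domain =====

-- B replaces A's monotonic-stack + right_less-table construction by a direct three-pointer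
-- scan (rightmost descent, forward walk, backward tie walk); same single in-place swap,
-- equivalence proved on the return value (both mutate `arr` the same way in Python).

-- ===== PORT A =====
-- while stk and arr[stk[-1]] < arr[i]: right_less[i] = stk.pop()
-- (stack represented head-first: head = Python's stk[-1]; all indices used stay in range)
def popLessA (arr : List Int) (i : Nat) : List Nat → List Nat → List Nat × List Nat
  | [], rl => ([], rl)
  | t :: s, rl =>
      if arr.getD t 0 < arr.getD i 0 then popLessA arr i s (rl.set i t)
      else (t :: s, rl)

-- while stk and arr[stk[-1]] == arr[i]: stk.pop()
def popEqA (arr : List Int) (i : Nat) : List Nat → List Nat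
  | [] => []
  | t :: s => if arr.getD t 0 = arr.getD i 0 then popEqA arr i s else t :: s

-- for i in range(N-1, -1, -1): both whiles, then stk.append(i); counter c processes index c-1
def loop1A (arr : List Int) : Nat → List Nat → List Nat → List Nat × List Nat
  | 0, stk, rl => (stk, rl)
  | c + 1, stk, rl =>
      loop1A arr c (c :: popEqA arr c (popLessA arr c stk rl).1) (popLessA arr c stk rl).2

-- for i in range(N-1, -1, -1): if right_less[i] < N: swap; return arr
def loop2A (arr : List Int) (rl : List Nat) : Nat → List Int
  | 0 => arr
  | c + 1 =>
      if rl.getD c arr.length < arr.length then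
        (arr.set c (arr.getD (rl.getD c arr.length) 0)).set (rl.getD c arr.length) (arr.getD c 0)
      else loop2A arr rl c

def prevPermOpt1_1 (arr : List Int) : List Int :=
  loop2A arr (loop1A arr arr.length [] (List.replicate arr.length arr.length)).2 arr.length

-- ===== PORT B =====
-- while i >= 0 and arr[i] <= arr[i+1]: i -= 1   (counter c checks index c-1 against c)
def findDescB (arr : List Int) : Nat → Option Nat
  | 0 => none
  | c + 1 => if arr.getD (c + 1) 0 < arr.getD c 0 then some c else findDescB arr c

-- while j + 1 < n and arr[j+1] < arr[i]: j += 1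
def advB (arr : List Int) (x : Int) (j : Nat) : Nat :=
  if h : j + 1 < arr.length ∧ arr.getD (j + 1) 0 < x then advB arr x (j + 1) else j
termination_by arr.length - j
decreasing_by omega

-- while arr[j] == arr[j-1]: j -= 1   (only ever called with j ≥ 1, where it is exact)
def backB (arr : List Int) : Nat → Nat
  | 0 => 0
  | j + 1 => if arr.getD (j + 1) 0 = arr.getD j 0 then backB arr j else j + 1

def prevPermOpt1_1_alt (arr : List Int) : List Int :=
  match findDescB arr (arr.length - 1) with
  | none => arr
  | some i =>
      let j := backB arr (advB arr (arr.getD i 0) (i + 1))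
      (arr.set i (arr.getD j 0)).set j (arr.getD i 0)

-- ===== PRECONDITION & SPEC =====
def Spec_prevPermOpt1_1 (arr : List Int) (out : List Int) : Prop := out = prevPermOpt1_1_alt arr
instance (arr : List Int) (out : List Int) : Decidable (Spec_prevPermOpt1_1 arr out) := by unfold Spec_prevPermOpt1_1; infer_instance

-- ===== CLAIM (what is proved, stated in full; the proofs are below) =====
def Claim_equal_prevPermOpt1_1 : Prop := ∀ (arr : List Int), Dom_prevPermOpt1_1 arr → Spec_prevPermOpt1_1 arr (prevPermOpt1_1 arr)

-- ===== LEMMAS AND PROOFS =====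

-- arr is non-decreasing from index k on
def pvNd (arr : List Int) (k : Nat) : Prop :=
  ∀ m, k ≤ m → m + 1 < arr.length → arr.getD m 0 ≤ arr.getD (m + 1) 0

-- the strictly-increasing-value part of A's stack above index k
def tailSpec (arr : List Int) (k : Nat) : List Nat :=
  (List.range' (k + 1) (arr.length - (k + 1))).filter
    (fun j => decide (arr.getD (j - 1) 0 < arr.getD j 0))

def stkSpec (arr : List Int) (k : Nat) : List Nat :=
  if k < arr.length then k :: tailSpec arr k else []

-- value recorded by the popLessA loop: last popped index
def lastPop (arr : List Int) (x : Int) : List Nat → Nat → Nat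
  | [], c => c
  | t :: s, c => if arr.getD t 0 < x then lastPop arr x s t else c

-- characterisation of the swap partner: leftmost occurrence of the largest suffix value < arr[i0]
def pvProps (arr : List Int) (i0 j : Nat) : Prop :=
  i0 + 1 ≤ j ∧ j < arr.length ∧ arr.getD j 0 < arr.getD i0 0 ∧
  (j = i0 + 1 ∨ arr.getD (j - 1) 0 < arr.getD j 0) ∧
  (∀ m, i0 + 1 ≤ m → m < arr.length → arr.getD m 0 < arr.getD i0 0 →
    arr.getD m 0 ≤ arr.getD j 0)

lemma pvChain (arr : List Int) (k : Nat) (h : pvNd arr k) :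
    ∀ a b, k ≤ a → a ≤ b → b < arr.length → arr.getD a 0 ≤ arr.getD b 0 := by
  intro a b hka hab hb
  induction b with
  | zero =>
    have : a = 0 := Nat.le_zero.mp hab
    subst this; exact le_refl _
  | succ n ih =>
    rcases Nat.eq_or_lt_of_le hab with rfl | hlt
    · exact le_refl _
    · have ha_n : a ≤ n := Nat.lt_succ_iff.mp hlt
      exact le_trans (ih ha_n (Nat.lt_of_succ_lt hb)) (h n (le_trans hka ha_n) hb)

lemma tailSpec_big (arr : List Int) (k : Nat) (h : arr.length ≤ k + 1) :
    tailSpec arr k = [] := by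
  unfold tailSpec
  have hz : arr.length - (k + 1) = 0 := by omega
  rw [hz]
  rfl

lemma tailSpec_unfold (arr : List Int) (k : Nat) (h : k + 1 < arr.length) :
    tailSpec arr k =
      (if arr.getD k 0 < arr.getD (k + 1) 0 then [k + 1] else []) ++ tailSpec arr (k + 1) := by
  unfold tailSpec
  have h2 : arr.length - (k + 1) = (arr.length - (k + 2)) + 1 := by omega
  have h4 : k + 1 + 1 = k + 2 := rfl
  rw [h2, List.range'_succ, List.filter_cons]
  have h3 : k + 1 - 1 = k := by omega
  rw [h3, h4]
  simp only [decide_eq_true_eq]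
  by_cases hc : arr.getD k 0 < arr.getD (k + 1) 0
  · rw [if_pos hc, if_pos hc]; rfl
  · rw [if_neg hc, if_neg hc]; rfl

lemma mem_tailSpec (arr : List Int) (k j : Nat) (h : j ∈ tailSpec arr k) :
    k + 1 ≤ j ∧ j < arr.length ∧ arr.getD (j - 1) 0 < arr.getD j 0 := by
  unfold tailSpec at h
  rw [List.mem_filter, List.mem_range'_1] at h
  obtain ⟨⟨h1, h2⟩, h3⟩ := h
  exact ⟨h1, by omega, by simpa using h3⟩

lemma tailSpec_gt (arr : List Int) (k j : Nat) (hnd : pvNd arr k)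
    (h : j ∈ tailSpec arr k) : arr.getD k 0 < arr.getD j 0 := by
  obtain ⟨h1, h2, h3⟩ := mem_tailSpec arr k j h
  have hle : arr.getD k 0 ≤ arr.getD (j - 1) 0 :=
    pvChain arr k hnd k (j - 1) (le_refl _) (by omega) (by omega)
  exact lt_of_le_of_lt hle h3

lemma popEqA_noop (arr : List Int) (i : Nat) (s : List Nat)
    (h : ∀ t ∈ s, arr.getD t 0 ≠ arr.getD i 0) : popEqA arr i s = s := by
  cases s with
  | nil => rfl
  | cons t s => rw [popEqA, if_neg (h t (by simp))]

lemma run_nd (arr : List Int) (k : Nat) (hnd : pvNd arr k) (hk : k ≤ arr.length) :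
    ∀ rl, loop1A arr arr.length [] rl = loop1A arr k (stkSpec arr k) rl := by
  have H : ∀ d k rl, pvNd arr k → k ≤ arr.length → arr.length - k ≤ d →
      loop1A arr arr.length [] rl = loop1A arr k (stkSpec arr k) rl := by
    intro d
    induction d with
    | zero =>
      intro k rl hnd hk hd
      have : k = arr.length := by omega
      subst this
      simp [stkSpec]
    | succ n ih =>
      intro k rl hnd hk hd
      rcases Nat.eq_or_lt_of_le hk with rfl | hklt
      · simp [stkSpec]
      · have hnd1 : pvNd arr (k + 1) := fun m hm hm2 => hnd m (by omega) hm2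
        rw [ih (k + 1) rl hnd1 (by omega) (by omega)]
        have hpl : popLessA arr k (stkSpec arr (k + 1)) rl = (stkSpec arr (k + 1), rl) := by
          by_cases hk1 : k + 1 < arr.length
          · rw [stkSpec, if_pos hk1, popLessA, if_neg (not_lt.mpr (hnd k (le_refl _) hk1))]
          · rw [stkSpec, if_neg hk1]; rfl
        have hpe : popEqA arr k (stkSpec arr (k + 1)) = tailSpec arr k := by
          by_cases hk1 : k + 1 < arr.length
          · rw [stkSpec, if_pos hk1]
            by_cases heq : arr.getD (k + 1) 0 = arr.getD k 0
            · rw [popEqA, if_pos heq]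
              have hnoop : popEqA arr k (tailSpec arr (k + 1)) = tailSpec arr (k + 1) := by
                apply popEqA_noop
                intro t ht
                have := tailSpec_gt arr (k + 1) t hnd1 ht
                omega
              rw [hnoop, tailSpec_unfold arr k hk1, if_neg (by omega)]
              rfl
            · rw [popEqA, if_neg heq]
              have hlt : arr.getD k 0 < arr.getD (k + 1) 0 := by
                have := hnd k (le_refl _) hk1
                omega
              rw [tailSpec_unfold arr k hk1, if_pos hlt]
              rfl
          · rw [stkSpec, if_neg hk1, tailSpec_big arr k (by omega)]
            rfl
        show loop1A arr (k + 1) (stkSpec arr (k + 1)) rl = _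
        rw [loop1A, hpl]
        show loop1A arr k (k :: popEqA arr k (stkSpec arr (k + 1))) rl = _
        rw [hpe, stkSpec, if_pos hklt]
  intro rl
  exact H (arr.length - k) k rl hnd hk (le_refl _)

lemma popLessA_rl (arr : List Int) (i : Nat) :
    ∀ (s : List Nat) (c : Nat) (rl : List Nat),
      (popLessA arr i s (rl.set i c)).2 = rl.set i (lastPop arr (arr.getD i 0) s c) := by
  intro s
  induction s with
  | nil => intro c rl; rw [popLessA, lastPop]
  | cons t s ih =>
    intro c rl
    by_cases hlt : arr.getD t 0 < arr.getD i 0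
    · rw [popLessA, if_pos hlt, List.set_set, lastPop, if_pos hlt]
      exact ih t rl
    · rw [popLessA, if_neg hlt, lastPop, if_neg hlt]

lemma popLessA_rl_ne (arr : List Int) (i i' : Nat) (d : Nat) (hne : i' ≠ i) :
    ∀ (s : List Nat) (rl : List Nat),
      ((popLessA arr i s rl).2).getD i' d = rl.getD i' d := by
  intro s
  induction s with
  | nil => intro rl; rfl
  | cons t s ih =>
    intro rl
    by_cases hlt : arr.getD t 0 < arr.getD i 0
    · rw [popLessA, if_pos hlt, ih]
      simp [List.getD_eq_getElem?_getD, List.getElem?_set_ne (Ne.symm hne)]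
    · rw [popLessA, if_neg hlt]

lemma loop1A_rl_ge (arr : List Int) (i' : Nat) (d : Nat) :
    ∀ (c : Nat) (stk rl : List Nat), c ≤ i' →
      ((loop1A arr c stk rl).2).getD i' d = rl.getD i' d := by
  intro c
  induction c with
  | zero => intro stk rl _; rfl
  | succ c ih =>
    intro stk rl hc
    rw [loop1A, ih _ _ (by omega), popLessA_rl_ne arr c i' d (by omega)]

lemma adv_spec (arr : List Int) (x : Int) :
    ∀ j, j < arr.length → arr.getD j 0 < x →
      j ≤ advB arr x j ∧ advB arr x j < arr.length ∧ arr.getD (advB arr x j) 0 < x ∧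
        ¬ (advB arr x j + 1 < arr.length ∧ arr.getD (advB arr x j + 1) 0 < x) := by
  have H : ∀ d j, arr.length - j ≤ d → j < arr.length → arr.getD j 0 < x →
      j ≤ advB arr x j ∧ advB arr x j < arr.length ∧ arr.getD (advB arr x j) 0 < x ∧
        ¬ (advB arr x j + 1 < arr.length ∧ arr.getD (advB arr x j + 1) 0 < x) := by
    intro d
    induction d with
    | zero => intro j h1 h2 _; omega
    | succ n ih =>
      intro j h1 hj hx
      rw [advB]
      by_cases hc : j + 1 < arr.length ∧ arr.getD (j + 1) 0 < x
      · rw [dif_pos hc]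
        obtain ⟨a1, a2, a3, a4⟩ := ih (j + 1) (by omega) hc.1 hc.2
        exact ⟨by omega, a2, a3, a4⟩
      · rw [dif_neg hc]
        exact ⟨le_refl _, hj, hx, hc⟩
  intro j hj hx
  exact H (arr.length - j) j (le_refl _) hj hx

lemma back_spec (arr : List Int) (i0 : Nat) (hnd : pvNd arr (i0 + 1))
    (hdesc : arr.getD (i0 + 1) 0 < arr.getD i0 0) :
    ∀ j, i0 + 1 ≤ j → j < arr.length →
      i0 + 1 ≤ backB arr j ∧ backB arr j ≤ j ∧
        arr.getD (backB arr j) 0 = arr.getD j 0 ∧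
        (backB arr j = i0 + 1 ∨ arr.getD (backB arr j - 1) 0 < arr.getD (backB arr j) 0) := by
  intro j
  induction j with
  | zero => intro h1 _; omega
  | succ j ih =>
    intro hge hlt
    by_cases heq : arr.getD (j + 1) 0 = arr.getD j 0
    · have hji : i0 + 1 ≤ j := by
        rcases Nat.lt_or_ge j (i0 + 1) with h | h
        · have hj0 : j = i0 := by omega
          rw [hj0] at heq
          exact absurd heq (by omega)
        · exact h
      obtain ⟨r1, r2, r3, r4⟩ := ih hji (by omega)
      rw [backB, if_pos heq]
      exact ⟨r1, by omega, by rw [r3, heq], r4⟩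
    · rw [backB, if_neg heq]
      refine ⟨hge, le_refl _, rfl, ?_⟩
      rcases Nat.eq_or_lt_of_le hge with h | h
      · exact Or.inl h.symm
      · right
        have hle : arr.getD j 0 ≤ arr.getD (j + 1) 0 := hnd j (by omega) hlt
        simpa using lt_of_le_of_ne hle (fun hh => heq hh.symm)

lemma props_jB (arr : List Int) (i0 : Nat) (hnd : pvNd arr (i0 + 1))
    (hlt : i0 + 1 < arr.length) (hdesc : arr.getD (i0 + 1) 0 < arr.getD i0 0) :
    pvProps arr i0 (backB arr (advB arr (arr.getD i0 0) (i0 + 1))) := by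
  obtain ⟨a1, a2, a3, a4⟩ := adv_spec arr (arr.getD i0 0) (i0 + 1) hlt hdesc
  obtain ⟨b1, b2, b3, b4⟩ := back_spec arr i0 hnd hdesc _ (by omega) a2
  refine ⟨b1, by omega, by rw [b3]; exact a3, b4, ?_⟩
  intro m hm1 hm2 hm3
  rw [b3]
  rcases Nat.lt_or_ge m (advB arr (arr.getD i0 0) (i0 + 1) + 1) with h | h
  · exact pvChain arr (i0 + 1) hnd m _ hm1 (by omega) a2
  · exfalso
    have hx : ¬ arr.getD (advB arr (arr.getD i0 0) (i0 + 1) + 1) 0 < arr.getD i0 0 := by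
      intro hcon
      exact a4 ⟨by omega, hcon⟩
    have hch : arr.getD (advB arr (arr.getD i0 0) (i0 + 1) + 1) 0 ≤ arr.getD m 0 :=
      pvChain arr (i0 + 1) hnd _ m (by omega) (by omega) hm2
    omega

lemma props_lastPop (arr : List Int) (i0 : Nat) (hnd : pvNd arr (i0 + 1)) :
    ∀ n k c, arr.length - k ≤ n → i0 + 1 ≤ c → c ≤ k → k < arr.length →
      arr.getD c 0 = arr.getD k 0 → arr.getD c 0 < arr.getD i0 0 →
      (c = i0 + 1 ∨ arr.getD (c - 1) 0 < arr.getD c 0) →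
      (∀ m, i0 + 1 ≤ m → m ≤ k → arr.getD m 0 < arr.getD i0 0 →
        arr.getD m 0 ≤ arr.getD c 0) →
      pvProps arr i0 (lastPop arr (arr.getD i0 0) (tailSpec arr k) c) := by
  intro n
  induction n with
  | zero => intro k c h1 _ _ h4 _ _ _ _; omega
  | succ n ih =>
    intro k c h1 h2 h3 h4 h5 h6 h7 h8
    by_cases hk1 : k + 1 < arr.length
    · rw [tailSpec_unfold arr k hk1]
      by_cases hlt : arr.getD k 0 < arr.getD (k + 1) 0
      · rw [if_pos hlt, List.singleton_append]
        by_cases hx : arr.getD (k + 1) 0 < arr.getD i0 0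
        · rw [lastPop, if_pos hx]
          apply ih (k + 1) (k + 1) (by omega) (by omega) (le_refl _) hk1 rfl hx
          · right; simpa using hlt
          · intro m hm1 hm2 hm3
            exact pvChain arr (i0 + 1) hnd m (k + 1) hm1 hm2 hk1
        · rw [lastPop, if_neg hx]
          refine ⟨h2, by omega, h6, h7, ?_⟩
          intro m hm1 hm2 hm3
          rcases Nat.lt_or_ge m (k + 1) with h | h
          · exact h8 m hm1 (by omega) hm3
          · exfalso
            have hch : arr.getD (k + 1) 0 ≤ arr.getD m 0 :=
              pvChain arr (i0 + 1) hnd (k + 1) m (by omega) (by omega) hm2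
            omega
      · rw [if_neg hlt, List.nil_append]
        have hk1le : arr.getD k 0 ≤ arr.getD (k + 1) 0 := hnd k (by omega) hk1
        have heqk : arr.getD c 0 = arr.getD (k + 1) 0 := by omega
        apply ih (k + 1) c (by omega) h2 (by omega) hk1 heqk h6 h7
        intro m hm1 hm2 hm3
        rcases Nat.lt_or_ge m (k + 1) with h | h
        · exact h8 m hm1 (by omega) hm3
        · have hm : m = k + 1 := by omega
          rw [hm]; omega
    · rw [tailSpec_big arr k (by omega), lastPop]
      refine ⟨h2, by omega, h6, h7, ?_⟩
      intro m hm1 hm2 hm3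
      exact h8 m hm1 (by omega) hm3

lemma props_unique (arr : List Int) (i0 : Nat) (hnd : pvNd arr (i0 + 1)) :
    ∀ j1 j2, pvProps arr i0 j1 → pvProps arr i0 j2 → j1 = j2 := by
  have key : ∀ j1 j2, j1 < j2 → pvProps arr i0 j1 → pvProps arr i0 j2 → False := by
    rintro j1 j2 hlt ⟨a1, a2, a3, a4, a5⟩ ⟨b1, b2, b3, b4, b5⟩
    have h12 : arr.getD j1 0 ≤ arr.getD j2 0 := b5 j1 a1 a2 a3
    have h21 : arr.getD j2 0 ≤ arr.getD j1 0 := a5 j2 b1 b2 b3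
    have hj2 : arr.getD (j2 - 1) 0 < arr.getD j2 0 := by
      rcases b4 with h | h
      · omega
      · exact h
    have hch : arr.getD j1 0 ≤ arr.getD (j2 - 1) 0 :=
      pvChain arr (i0 + 1) hnd j1 (j2 - 1) a1 (by omega) (by omega)
    omega
  intro j1 j2 h1 h2
  rcases Nat.lt_trichotomy j1 j2 with h | h | h
  · exact (key j1 j2 h h1 h2).elim
  · exact h
  · exact (key j2 j1 h h2 h1).elim

lemma fd_none (arr : List Int) :
    ∀ k, findDescB arr k = none → ∀ i, i < k → arr.getD i 0 ≤ arr.getD (i + 1) 0 := by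
  intro k
  induction k with
  | zero => intro _ i hi; omega
  | succ k ih =>
    intro h i hi
    rw [findDescB] at h
    by_cases hc : arr.getD (k + 1) 0 < arr.getD k 0
    · rw [if_pos hc] at h; cases h
    · rw [if_neg hc] at h
      rcases Nat.lt_succ_iff_lt_or_eq.mp hi with h' | rfl
      · exact ih h i h'
      · exact not_lt.mp hc
  
lemma fd_some (arr : List Int) :
    ∀ k i, findDescB arr k = some i →
      i + 1 ≤ k ∧ arr.getD (i + 1) 0 < arr.getD i 0 ∧
        (∀ m, i < m → m + 1 ≤ k → arr.getD m 0 ≤ arr.getD (m + 1) 0) := by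
  intro k
  induction k with
  | zero => intro i h; simp [findDescB] at h
  | succ k ih =>
    intro i h
    rw [findDescB] at h
    by_cases hc : arr.getD (k + 1) 0 < arr.getD k 0
    · rw [if_pos hc] at h
      injection h with h
      subst h
      exact ⟨le_refl _, hc, fun m hm hm2 => by omega⟩
    · rw [if_neg hc] at h
      obtain ⟨h1, h2, h3⟩ := ih i h
      refine ⟨by omega, h2, fun m hm hm2 => ?_⟩
      rcases Nat.lt_or_ge (m + 1) (k + 1) with h' | h'
      · exact h3 m hm (by omega)
      · have hm : m = k := by omega
        rw [hm]
        exact not_lt.mp hc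

lemma loop2A_all (arr : List Int) (rl : List Nat)
    (h : ∀ i, i < arr.length → rl.getD i arr.length = arr.length) :
    ∀ c, c ≤ arr.length → loop2A arr rl c = arr := by
  intro c
  induction c with
  | zero => intro _; rfl
  | succ c ih =>
    intro hc
    rw [loop2A, h c (by omega), if_neg (lt_irrefl _)]
    exact ih (by omega)

lemma loop2A_skip (arr : List Int) (rl : List Nat) (i0 : Nat)
    (h : ∀ i, i0 < i → i < arr.length → rl.getD i arr.length = arr.length) :
    ∀ c, i0 + 1 ≤ c → c ≤ arr.length → loop2A arr rl c = loop2A arr rl (i0 + 1) := by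
  intro c
  induction c with
  | zero => intro h1 _; omega
  | succ c ih =>
    intro h1 h2
    rcases Nat.eq_or_lt_of_le h1 with h' | h'
    · rw [h']
    · rw [loop2A, h c (by omega) (by omega), if_neg (lt_irrefl _)]
      exact ih (by omega) (by omega)

lemma main_eq (arr : List Int) : prevPermOpt1_1 arr = prevPermOpt1_1_alt arr := by
  rcases hfd : findDescB arr (arr.length - 1) with _ | i0
  · -- no descent: arr is non-decreasing, both sides return arr unchanged
    have hnd : pvNd arr 0 := fun m _ hm => fd_none arr _ hfd m (by omega)
    have hr := run_nd arr 0 hnd (Nat.zero_le _) (List.replicate arr.length arr.length)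
    show loop2A arr (loop1A arr arr.length [] (List.replicate arr.length arr.length)).2
        arr.length = prevPermOpt1_1_alt arr
    rw [hr]
    have hsnd : (loop1A arr 0 (stkSpec arr 0) (List.replicate arr.length arr.length)).2 =
        List.replicate arr.length arr.length := rfl
    rw [hsnd, loop2A_all arr _ (fun i hi => List.getD_replicate _ hi) arr.length (le_refl _)]
    unfold prevPermOpt1_1_alt
    rw [hfd]
  · -- descent at i0: both sides swap positions i0 and jB
    obtain ⟨hi1, hdesc, hmono⟩ := fd_some arr _ _ hfd
    have hN : i0 + 1 < arr.length := by omega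
    have hnd : pvNd arr (i0 + 1) := fun m hm hm2 => hmono m (by omega) (by omega)
    have hpropsB := props_jB arr i0 hnd hN hdesc
    have hpropsL := props_lastPop arr i0 hnd (arr.length - (i0 + 1)) (i0 + 1) (i0 + 1)
      (le_refl _) (le_refl _) (le_refl _) hN rfl hdesc (Or.inl rfl)
      (fun m hm1 hm2 _ => pvChain arr (i0 + 1) hnd m (i0 + 1) hm1 hm2 hN)
    have hjeq : lastPop arr (arr.getD i0 0) (tailSpec arr (i0 + 1)) (i0 + 1)
        = backB arr (advB arr (arr.getD i0 0) (i0 + 1)) :=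
      props_unique arr i0 hnd _ _ hpropsL hpropsB
    have hr := run_nd arr (i0 + 1) hnd (by omega) (List.replicate arr.length arr.length)
    have hstep : loop1A arr arr.length [] (List.replicate arr.length arr.length)
        = loop1A arr i0
            (i0 :: popEqA arr i0 (popLessA arr i0 (tailSpec arr (i0 + 1))
              ((List.replicate arr.length arr.length).set i0 (i0 + 1))).1)
            ((List.replicate arr.length arr.length).set i0
              (lastPop arr (arr.getD i0 0) (tailSpec arr (i0 + 1)) (i0 + 1))) := by
      rw [hr, stkSpec, if_pos hN, loop1A, popLessA, if_pos hdesc,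
        popLessA_rl arr i0 (tailSpec arr (i0 + 1)) (i0 + 1)
          (List.replicate arr.length arr.length)]
    have hsk : ∀ i, i0 < i → i < arr.length →
        ((loop1A arr i0
            (i0 :: popEqA arr i0 (popLessA arr i0 (tailSpec arr (i0 + 1))
              ((List.replicate arr.length arr.length).set i0 (i0 + 1))).1)
            ((List.replicate arr.length arr.length).set i0
              (lastPop arr (arr.getD i0 0) (tailSpec arr (i0 + 1)) (i0 + 1)))).2).getD
          i arr.length = arr.length := by
      intro i hi1 hi2
      rw [loop1A_rl_ge arr i arr.length i0 _ _ (by omega),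
        List.getD_eq_getElem?_getD, List.getElem?_set_ne (by omega),
        ← List.getD_eq_getElem?_getD, List.getD_replicate _ hi2]
    have hv : ((loop1A arr i0
            (i0 :: popEqA arr i0 (popLessA arr i0 (tailSpec arr (i0 + 1))
              ((List.replicate arr.length arr.length).set i0 (i0 + 1))).1)
            ((List.replicate arr.length arr.length).set i0
              (lastPop arr (arr.getD i0 0) (tailSpec arr (i0 + 1)) (i0 + 1)))).2).getD
          i0 arr.length = lastPop arr (arr.getD i0 0) (tailSpec arr (i0 + 1)) (i0 + 1) := by
      rw [loop1A_rl_ge arr i0 arr.length i0 _ _ (le_refl _),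
        List.getD_eq_getElem?_getD, List.getElem?_set_self (by simp; omega)]
      rfl
    have hjlt : lastPop arr (arr.getD i0 0) (tailSpec arr (i0 + 1)) (i0 + 1) < arr.length := by
      rw [hjeq]; exact hpropsB.2.1
    show loop2A arr (loop1A arr arr.length [] (List.replicate arr.length arr.length)).2
        arr.length = prevPermOpt1_1_alt arr
    rw [hstep, loop2A_skip arr _ i0 hsk arr.length (by omega) (le_refl _), loop2A, hv,
      if_pos hjlt]
    unfold prevPermOpt1_1_alt
    rw [hfd]
    show _ = (arr.set i0 (arr.getD (backB arr (advB arr (arr.getD i0 0) (i0 + 1))) 0)).set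
        (backB arr (advB arr (arr.getD i0 0) (i0 + 1))) (arr.getD i0 0)
    rw [hjeq]

-- ===== VERDICT (by name: the statement is the Claim_ definition above) =====
theorem prevPermOpt1_1_spec : Claim_equal_prevPermOpt1_1 := by
  intro arr _
  unfold Spec_prevPermOpt1_1
  exact main_eq arr
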